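-- pv_equiv track=rewrite | github.com/mbshark/ECE180D-OTG | LetterConfiguration.py | findHorizontalAjacencyScore
-- ===== SOURCE A (Python) =====
-- def findHorizontalAjacencyScore(seatingMatrix):
-- 	scores = []
-- 	for r in seatingMatrix:
-- 		best = 0
-- 		curr = 0
-- 		for p in range(len(r)):
-- 			if (r[p] == 1):
-- 				curr+=1
-- 			else:
-- 				if (curr > best):
-- 					best = curr
-- 				curr = 0
-- 		if (curr > best):
-- 			best = curr
-- 		scores.append(best)
-- 	return scores
-- ===== SOURCE B (Python) =====
-- def findHorizontalAjacencyScore(seatingMatrix):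
--     scores = []
--     for r in seatingMatrix:
--         runs = []
--         i, n = 0, len(r)
--         while i < n:
--             if r[i] == 1:
--                 j = i
--                 while j < n and r[j] == 1:
--                     j += 1
--                 runs.append(j - i)
--                 i = j
--             else:
--                 i += 1
--         scores.append(max(runs, default=0))
--     return scores
-- ===== Notes on version B (the rewrite author's own statement) =====
-- stated objective: alternative
-- what changed: Replaces the per-element best/curr running counters with a two-pointer run scan that collects the lengths of maximal runs of 1s and takes their max (default 0).
import Mathlib
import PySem

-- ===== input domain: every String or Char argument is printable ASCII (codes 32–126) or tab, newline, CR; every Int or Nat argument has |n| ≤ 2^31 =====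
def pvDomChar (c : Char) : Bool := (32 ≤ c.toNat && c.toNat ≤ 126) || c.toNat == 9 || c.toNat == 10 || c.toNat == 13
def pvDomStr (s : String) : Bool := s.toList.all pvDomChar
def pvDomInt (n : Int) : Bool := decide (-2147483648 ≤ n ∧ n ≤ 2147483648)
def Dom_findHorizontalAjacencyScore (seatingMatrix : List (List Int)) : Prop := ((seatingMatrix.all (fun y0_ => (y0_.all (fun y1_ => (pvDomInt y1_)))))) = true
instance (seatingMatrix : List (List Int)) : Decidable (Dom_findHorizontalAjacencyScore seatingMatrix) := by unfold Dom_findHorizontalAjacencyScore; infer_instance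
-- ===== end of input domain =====

-- B replaces A's best/curr running counters with a run-scan: collect maximal runs of 1s, take the max (alternative decomposition, same cost).


-- ===== PORT A =====
def findHorizontalAjacencyScore (seatingMatrix : List (List Int)) : List Int :=
  seatingMatrix.foldl (fun scores r =>
    let bc : Int × Int := r.foldl (fun bc x =>
      if x = 1 then (bc.1, bc.2 + 1)
      else ((if bc.2 > bc.1 then bc.2 else bc.1), 0)) (0, 0)
    scores ++ [if bc.2 > bc.1 then bc.2 else bc.1]) []

-- ===== PORT B =====
-- inner `while j < n and r[j] == 1` loop: count of leading 1s and the remaining suffix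
def takeOnes : List Int → Nat × List Int
  | [] => (0, [])
  | x :: xs => if x = 1 then ((takeOnes xs).1 + 1, (takeOnes xs).2) else (0, x :: xs)

theorem takeOnes_len_le : ∀ (xs : List Int), (takeOnes xs).2.length ≤ xs.length := by
  intro xs
  induction xs with
  | nil => simp [takeOnes]
  | cons x xs ih =>
    simp only [takeOnes]
    split
    · exact Nat.le_succ_of_le ih
    · simp

-- outer while loop: the lengths of the maximal runs of 1s, in order
def rowRuns : List Int → List Nat
  | [] => []
  | x :: xs =>
    if x = 1 then ((takeOnes xs).1 + 1) :: rowRuns (takeOnes xs).2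
    else rowRuns xs
termination_by xs => xs.length
decreasing_by
  · exact Nat.lt_succ_of_le (takeOnes_len_le xs)
  · exact Nat.lt_succ_self _

def findHorizontalAjacencyScore_alt (seatingMatrix : List (List Int)) : List Int :=
  seatingMatrix.map (fun r => ((rowRuns r).foldl max 0 : Nat))

-- ===== PRECONDITION & SPEC =====
def Spec_findHorizontalAjacencyScore (seatingMatrix : List (List Int)) (out : List Int) : Prop := out = findHorizontalAjacencyScore_alt seatingMatrix
instance (seatingMatrix : List (List Int)) (out : List Int) : Decidable (Spec_findHorizontalAjacencyScore seatingMatrix out) := by unfold Spec_findHorizontalAjacencyScore; infer_instance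

-- ===== CLAIM (what is proved, stated in full; the proofs are below) =====
def Claim_equal_findHorizontalAjacencyScore : Prop := ∀ (seatingMatrix : List (List Int)), Dom_findHorizontalAjacencyScore seatingMatrix → Spec_findHorizontalAjacencyScore seatingMatrix (findHorizontalAjacencyScore seatingMatrix)

-- ===== LEMMAS AND PROOFS =====
-- proof-side characterisation of A's inner loop: best run, current run already c long
def runMax (c : Int) : List Int → Int
  | [] => c
  | x :: xs => if x = 1 then runMax (c + 1) xs else max c (runMax 0 xs)

theorem runMax_nonneg : ∀ (xs : List Int) (c : Int), 0 ≤ c → 0 ≤ runMax c xs := by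
  intro xs
  induction xs with
  | nil => intro c hc; simpa [runMax] using hc
  | cons x xs ih =>
    intro c hc
    simp only [runMax]
    split
    · exact ih _ (by omega)
    · exact le_max_of_le_left hc

theorem loopA_eq_runMax : ∀ (xs : List Int) (b c : Int), 0 ≤ b → 0 ≤ c →
    (let bc := xs.foldl (fun (bc : Int × Int) x =>
      if x = 1 then (bc.1, bc.2 + 1)
      else ((if bc.2 > bc.1 then bc.2 else bc.1), 0)) (b, c)
     if bc.2 > bc.1 then bc.2 else bc.1) = max b (runMax c xs) := by
  intro xs
  induction xs with
  | nil => intro b c hb hc; simp only [List.foldl_nil, runMax]; omega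
  | cons x xs ih =>
    intro b c hb hc
    simp only [List.foldl_cons]
    by_cases hx : x = 1
    · simp only [hx, runMax]
      exact ih b (c + 1) hb (by omega)
    · simp only [runMax, if_neg hx]
      rw [ih _ 0 (by omega) le_rfl]
      have := runMax_nonneg xs 0 le_rfl
      split_ifs <;> omega

theorem foldl_max_shift : ∀ (rs : List Nat) (a : Nat), rs.foldl max a = max a (rs.foldl max 0) := by
  intro rs
  induction rs with
  | nil => intro a; simp
  | cons x rs ih =>
    intro a
    simp only [List.foldl_cons]
    rw [ih (max a x), ih (max 0 x)]
    omega

theorem runMax_takeOnes : ∀ (xs : List Int) (c : Int), 0 ≤ c →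
    runMax c xs = max (c + (takeOnes xs).1) (runMax 0 (takeOnes xs).2) := by
  intro xs
  induction xs with
  | nil => intro c hc; simp only [runMax, takeOnes]; omega
  | cons x xs ih =>
    intro c hc
    by_cases hx : x = 1
    · simp only [runMax, takeOnes, if_pos hx]
      rw [ih (c + 1) (by omega)]
      push_cast
      omega
    · simp only [runMax, takeOnes, if_neg hx]
      have h0 := runMax_nonneg xs 0 le_rfl
      rw [ih 0 le_rfl]
      have h1 : (0:Int) ≤ (takeOnes xs).1 := by positivity
      have h2 := runMax_nonneg (takeOnes xs).2 0 le_rfl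
      omega

theorem runMax_eq_rowRuns : ∀ (xs : List Int), runMax 0 xs = ((rowRuns xs).foldl max 0 : Nat) := by
  intro xs
  induction xs using rowRuns.induct with
  | case1 => simp [runMax, rowRuns]
  | case2 xs ih =>
    rw [show runMax 0 (1 :: xs) = runMax 1 xs by simp [runMax],
        show rowRuns (1 :: xs) = ((takeOnes xs).1 + 1) :: rowRuns (takeOnes xs).2 by simp [rowRuns],
        List.foldl_cons]
    rw [show runMax 1 xs = runMax (0 + 1) xs by norm_num, runMax_takeOnes xs (0+1) (by omega), ih]
    rw [foldl_max_shift (rowRuns (takeOnes xs).2) (max 0 ((takeOnes xs).1 + 1))]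
    push_cast
    omega
  | case3 x xs hx ih =>
    simp only [runMax, rowRuns, if_neg hx]
    rw [ih]
    have : (0:Int) ≤ ((rowRuns xs).foldl max 0 : Nat) := by positivity
    omega

theorem rowA_eq (r : List Int) :
    (let bc : Int × Int := r.foldl (fun bc x =>
      if x = 1 then (bc.1, bc.2 + 1)
      else ((if bc.2 > bc.1 then bc.2 else bc.1), 0)) (0, 0)
     if bc.2 > bc.1 then bc.2 else bc.1) = (((rowRuns r).foldl max 0 : Nat) : Int) := by
  have h := loopA_eq_runMax r 0 0 le_rfl le_rfl
  simp only at h ⊢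
  rw [h, runMax_eq_rowRuns]
  have h0 : (0:Int) ≤ (((rowRuns r).foldl max 0 : Nat) : Int) := by positivity
  omega

theorem outerA_eq : ∀ (m : List (List Int)) (acc : List Int),
    m.foldl (fun scores r =>
      let bc : Int × Int := r.foldl (fun bc x =>
        if x = 1 then (bc.1, bc.2 + 1)
        else ((if bc.2 > bc.1 then bc.2 else bc.1), 0)) (0, 0)
      scores ++ [if bc.2 > bc.1 then bc.2 else bc.1]) acc
    = acc ++ m.map (fun r => (((rowRuns r).foldl max 0 : Nat) : Int)) := by
  intro m
  induction m with
  | nil => intro acc; simp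
  | cons s m ih =>
    intro acc
    simp only [List.foldl_cons, List.map_cons]
    rw [ih]
    have h := rowA_eq s
    simp only at h
    rw [h]
    simp

-- ===== VERDICT (by name: the statement is the Claim_ definition above) =====
theorem findHorizontalAjacencyScore_spec : Claim_equal_findHorizontalAjacencyScore := by
  intro m _
  unfold Spec_findHorizontalAjacencyScore findHorizontalAjacencyScore findHorizontalAjacencyScore_alt
  rw [outerA_eq]
  simp
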